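-- pv_equiv track=rewrite | github.com/matth2k/cs6120-exercises | l4/dfsolver.py | boundJoin
-- ===== SOURCE A (Python) =====
-- from typing import Any
--
-- def boundUnion(b1: tuple, b2: tuple[2]):
--     return (
--         min(b1[0], b2[0]) if b1[0] is not None and b2[0] is not None else None,
--         max(b1[1], b2[1]) if b1[1] is not None and b2[1] is not None else None,
--     )
--
-- def boundJoin(l: list[dict[str, tuple[Any, Any]]]) -> dict[str, tuple[Any, Any]]:
--     d = l.pop()
--     while len(l) > 0:
--         q = l.pop()
--         for k, v in q.items():
--             if k in d:
--                 d[k] = boundUnion(d[k], v)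
--             else:
--                 d[k] = v
--
--     return d
-- ===== SOURCE B (Python) =====
-- # Two-pass group-then-reduce: first pass pops every dict off l (so l is
-- # emptied and an empty l raises IndexError, exactly like A) and indexes all
-- # bound tuples by key; second pass reduces each key's list with boundUnion.
-- def boundUnion(b1, b2):
--     return (
--         min(b1[0], b2[0]) if b1[0] is not None and b2[0] is not None else None,
--         max(b1[1], b2[1]) if b1[1] is not None and b2[1] is not None else None,
--     )
--
-- def _reduce(vs):
--     acc = vs[0]
--     for v in vs[1:]:
--         acc = boundUnion(acc, v)
--     return acc
--
-- def boundJoin(l):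
--     groups = {}
--     q = l.pop()
--     while True:
--         for k, v in q.items():
--             groups.setdefault(k, []).append(v)
--         if not l:
--             break
--         q = l.pop()
--     return {k: _reduce(vs) for k, vs in groups.items()}
-- ===== Notes on version B (the rewrite author's own statement) =====
-- stated objective: alternative
-- what changed: A merges dicts one key-update at a time into an accumulator dict; B makes one pop-driven pass building an index from each key to the list of all its bound tuples, then a second pass reducing each list with boundUnion (B still empties l and raises IndexError on empty input, like A).
-- outside the precondition, e.g. on boundJoin([]): A raises IndexError, B raises IndexError
import Mathlib
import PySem

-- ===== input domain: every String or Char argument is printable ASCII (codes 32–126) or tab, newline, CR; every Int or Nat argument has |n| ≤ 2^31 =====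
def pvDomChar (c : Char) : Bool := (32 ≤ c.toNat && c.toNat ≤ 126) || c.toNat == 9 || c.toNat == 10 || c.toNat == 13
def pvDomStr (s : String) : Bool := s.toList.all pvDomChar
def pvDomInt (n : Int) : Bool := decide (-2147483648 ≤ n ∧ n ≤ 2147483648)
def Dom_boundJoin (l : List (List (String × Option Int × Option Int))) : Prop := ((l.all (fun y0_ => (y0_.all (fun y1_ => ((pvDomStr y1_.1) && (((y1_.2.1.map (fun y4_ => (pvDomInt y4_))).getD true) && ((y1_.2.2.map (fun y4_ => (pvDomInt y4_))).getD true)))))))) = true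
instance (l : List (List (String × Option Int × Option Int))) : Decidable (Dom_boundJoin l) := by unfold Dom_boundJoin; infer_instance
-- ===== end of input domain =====

-- B replaces A's one-at-a-time dict merging by a two-pass group-then-reduce over the
-- same popped stream (equivalence is about the return value; both Pythons empty l).


-- ===== PORT A =====
def boundUnion (b1 b2 : Option Int × Option Int) : Option Int × Option Int :=
  ((match b1.1, b2.1 with | some x, some y => some (min x y) | _, _ => none),
   (match b1.2, b2.2 with | some x, some y => some (max x y) | _, _ => none))

-- one iteration of A's inner 'for k, v in q.items()' body
def mergeItem (d : PySem.Dict String (Option Int × Option Int))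
    (kv : String × Option Int × Option Int) : PySem.Dict String (Option Int × Option Int) :=
  match d.get? kv.1 with          -- 'if k in d' / 'd[k]'
  | some w => d.insert kv.1 (boundUnion w kv.2)
  | none   => d.insert kv.1 kv.2

-- the successive l.pop() calls yield exactly l.reverse; [] means l.pop() raised
-- IndexError (excluded by Pre_boundJoin)
def boundJoin (l : List (List (String × Option Int × Option Int))) :
    List (String × Option Int × Option Int) :=
  match l.reverse with
  | [] => []
  | d :: rest => (rest.foldl (fun d q => q.foldl mergeItem d) (PySem.Dict.mk d)).items

-- ===== PORT B =====
-- groups.setdefault(k, []).append(v)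
def groupAdd (g : PySem.Dict String (List (Option Int × Option Int)))
    (kv : String × Option Int × Option Int) : PySem.Dict String (List (Option Int × Option Int)) :=
  g.modify kv.1 [] (· ++ [kv.2])

-- _reduce: seed from the first element, fold boundUnion over the rest
def reduceBounds : List (Option Int × Option Int) → Option Int × Option Int
  | [] => (none, none)   -- unreachable: every group is nonempty
  | v :: vs => vs.foldl boundUnion v

-- same pop-driven stream l.reverse; first pass groups, second pass reduces
def boundJoin_alt (l : List (List (String × Option Int × Option Int))) :
    List (String × Option Int × Option Int) :=
  match l.reverse with
  | [] => []
  | q :: rest =>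
    ((q :: rest).foldl (fun g q => q.foldl groupAdd g) PySem.Dict.empty).items.map
      (fun kv => (kv.1, reduceBounds kv.2))

-- ===== PRECONDITION & SPEC =====
-- l ≠ []: on [] Python's l.pop() raises IndexError (both A and B raise there).
-- Nodup keys: each inner assoc list stands for a Python dict, which cannot hold
-- duplicate keys, so lists with a repeated key correspond to no Python input at all.
def Pre_boundJoin (l : List (List (String × Option Int × Option Int))) : Prop :=
  l ≠ [] ∧ ∀ q ∈ l, (q.map Prod.fst).Nodup
instance (l : List (List (String × Option Int × Option Int))) : Decidable (Pre_boundJoin l) := by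
  unfold Pre_boundJoin; infer_instance

def pvWitness_boundJoin : (List (List (String × Option Int × Option Int))) :=
  [[("a", (some 1, some 2))], [("a", (some 0, none)), ("b", (none, some 3))]]

def Spec_boundJoin (l : List (List (String × Option Int × Option Int))) (out : List (String × Option Int × Option Int)) : Prop := out = boundJoin_alt l
instance (l : List (List (String × Option Int × Option Int))) (out : List (String × Option Int × Option Int)) : Decidable (Spec_boundJoin l out) := by unfold Spec_boundJoin; infer_instance

-- ===== CLAIM (what is proved, stated in full; the proofs are below) =====
def Claim_equal_boundJoin : Prop := ∀ (l : List (List (String × Option Int × Option Int))), Dom_boundJoin l → Pre_boundJoin l → Spec_boundJoin l (boundJoin l)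

-- ===== LEMMAS AND PROOFS =====

-- collapse a group index to the merged dict (per-key reduction, keys kept in place)
def collapse (g : PySem.Dict String (List (Option Int × Option Int))) :
    PySem.Dict String (Option Int × Option Int) :=
  PySem.Dict.mk (g.items.map (fun kv => (kv.1, reduceBounds kv.2)))

-- every stored group is nonempty
def InvNE (g : PySem.Dict String (List (Option Int × Option Int))) : Prop :=
  ∀ p ∈ g.items, p.2 ≠ []

theorem reduce_append (vs : List (Option Int × Option Int)) (hvs : vs ≠ [])
    (v : Option Int × Option Int) :
    reduceBounds (vs ++ [v]) = boundUnion (reduceBounds vs) v := by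
  cases vs with
  | nil => simp at hvs
  | cons v0 t => simp [reduceBounds, List.foldl_append]

theorem get?_collapse (g : PySem.Dict String (List (Option Int × Option Int))) (k : String) :
    (collapse g).get? k = (g.get? k).map reduceBounds := by
  simp only [collapse, PySem.Dict.get?, List.find?_map]
  have he : ((fun p => p.1 == k) ∘
      (fun kv : String × List (Option Int × Option Int) => (kv.1, reduceBounds kv.2)))
      = (fun p => p.1 == k) := rfl
  rw [he]
  cases List.find? (fun p => p.1 == k) g.items with
  | none => rfl
  | some p => rfl

theorem contains_collapse (g : PySem.Dict String (List (Option Int × Option Int))) (k : String) :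
    (collapse g).contains k = g.contains k := by
  rw [PySem.Dict.contains_eq_isSome_get?, PySem.Dict.contains_eq_isSome_get?, get?_collapse]
  cases g.get? k <;> rfl

theorem collapse_groupAdd (g : PySem.Dict String (List (Option Int × Option Int)))
    (hg : InvNE g) (kv : String × Option Int × Option Int) :
    collapse (groupAdd g kv) = mergeItem (collapse g) kv := by
  obtain ⟨k, v⟩ := kv
  unfold groupAdd mergeItem PySem.Dict.modify
  rw [get?_collapse]
  cases h : g.get? k with
  | none =>
    have hc : g.contains k = false := by
      rw [PySem.Dict.contains_eq_isSome_get?, h]; rfl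
    have hcc : (collapse g).contains k = false := by rw [contains_collapse]; exact hc
    have hgetD : g.getD k [] = [] := by rw [PySem.Dict.getD_eq_get?_getD, h]; rfl
    apply PySem.Dict.ext
    simp only [Option.map_none]
    rw [PySem.Dict.items_insert_of_not_contains _ _ hcc]
    simp only [collapse, hgetD, List.nil_append]
    rw [PySem.Dict.items_insert_of_not_contains _ _ hc]
    simp [reduceBounds]
  | some vs =>
    have hvs : vs ≠ [] := hg (k, vs) (PySem.Dict.mem_items_of_get?_eq_some g h)
    have hc : g.contains k = true := by
      rw [PySem.Dict.contains_eq_isSome_get?, h]; rfl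
    have hcc : (collapse g).contains k = true := by rw [contains_collapse]; exact hc
    have hgetD : g.getD k [] = vs := by rw [PySem.Dict.getD_eq_get?_getD, h]; rfl
    apply PySem.Dict.ext
    simp only [Option.map_some]
    rw [PySem.Dict.items_insert_of_contains _ _ hcc]
    simp only [collapse, hgetD]
    rw [PySem.Dict.items_insert_of_contains _ _ hc]
    simp only [List.map_map]
    apply List.map_congr_left
    intro p _
    by_cases hpk : p.1 == k
    · simp [Function.comp, hpk, reduce_append vs hvs v]
    · simp [Function.comp, hpk]

theorem invNE_groupAdd (g : PySem.Dict String (List (Option Int × Option Int)))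
    (hg : InvNE g) (kv : String × Option Int × Option Int) : InvNE (groupAdd g kv) := by
  intro p hp
  unfold groupAdd PySem.Dict.modify at hp
  rw [PySem.Dict.mem_items_insert] at hp
  rcases hp with h | ⟨h, _⟩
  · subst h; simp
  · exact hg p h

theorem invNE_foldl (q : List (String × Option Int × Option Int))
    (g : PySem.Dict String (List (Option Int × Option Int))) (hg : InvNE g) :
    InvNE (q.foldl groupAdd g) := by
  induction q generalizing g with
  | nil => exact hg
  | cons kv t ih => exact ih _ (invNE_groupAdd g hg kv)

theorem collapse_foldl (q : List (String × Option Int × Option Int))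
    (g : PySem.Dict String (List (Option Int × Option Int))) (hg : InvNE g) :
    collapse (q.foldl groupAdd g) = q.foldl mergeItem (collapse g) := by
  induction q generalizing g with
  | nil => rfl
  | cons kv t ih =>
    simp only [List.foldl_cons]
    rw [ih _ (invNE_groupAdd g hg kv), collapse_groupAdd g hg kv]

theorem collapse_foldl_dicts (qs : List (List (String × Option Int × Option Int)))
    (g : PySem.Dict String (List (Option Int × Option Int))) (hg : InvNE g) :
    collapse (qs.foldl (fun g q => q.foldl groupAdd g) g)
      = qs.foldl (fun d q => q.foldl mergeItem d) (collapse g) := by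
  induction qs generalizing g with
  | nil => rfl
  | cons q t ih =>
    simp only [List.foldl_cons]
    rw [ih _ (invNE_foldl q g hg), collapse_foldl q g hg]

-- seeding the index from the empty dict with distinct fresh keys just appends singletons
theorem groupAdd_fresh (q : List (String × Option Int × Option Int))
    (g : PySem.Dict String (List (Option Int × Option Int)))
    (hnd : (q.map Prod.fst).Nodup) (hfresh : ∀ kv ∈ q, g.contains kv.1 = false) :
    q.foldl groupAdd g = PySem.Dict.mk (g.items ++ q.map (fun kv => (kv.1, [kv.2]))) := by
  induction q generalizing g with
  | nil => cases g; simp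
  | cons kv t ih =>
    have hc : g.contains kv.1 = false := hfresh kv (List.mem_cons_self)
    have hnone : g.get? kv.1 = none := by
      have := PySem.Dict.contains_eq_isSome_get? g kv.1
      rw [hc] at this
      cases h : g.get? kv.1 with
      | none => rfl
      | some _ => rw [h] at this; simp at this
    have hgetD : g.getD kv.1 [] = [] := by rw [PySem.Dict.getD_eq_get?_getD, hnone]; rfl
    have hstep : groupAdd g kv = PySem.Dict.mk (g.items ++ [(kv.1, [kv.2])]) := by
      unfold groupAdd PySem.Dict.modify
      apply PySem.Dict.ext
      rw [PySem.Dict.items_insert_of_not_contains _ _ hc, hgetD]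
      simp
    simp only [List.foldl_cons, hstep]
    rw [ih]
    · simp
    · simp only [List.map_cons, List.nodup_cons] at hnd; exact hnd.2
    · intro kv' h'
      have h1 : g.contains kv'.1 = false := hfresh kv' (List.mem_cons_of_mem _ h')
      have h2 : kv'.1 ≠ kv.1 := by
        simp only [List.map_cons, List.nodup_cons] at hnd
        intro he
        exact hnd.1 (he ▸ List.mem_map_of_mem h')
      simp only [PySem.Dict.contains, List.any_append, List.any_cons, List.any_nil,
        Bool.or_false]
      rw [show (g.items.any fun p => p.1 == kv'.1) = false from h1]
      simp [Ne.symm h2]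

theorem collapse_singletons (q : List (String × Option Int × Option Int)) :
    collapse (PySem.Dict.mk (q.map (fun kv => (kv.1, [kv.2])))) = PySem.Dict.mk q := by
  apply PySem.Dict.ext
  simp only [collapse, List.map_map]
  have : ((fun kv : String × List (Option Int × Option Int) => (kv.1, reduceBounds kv.2)) ∘
      (fun kv : String × (Option Int × Option Int) => (kv.1, [kv.2]))) = id := by
    funext kv; simp [Function.comp, reduceBounds]
  simp [this]

theorem invNE_singletons (q : List (String × Option Int × Option Int)) :
    InvNE (PySem.Dict.mk (q.map (fun kv => (kv.1, [kv.2])))) := by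
  intro p hp
  simp only [List.mem_map] at hp
  obtain ⟨kv, _, h⟩ := hp
  subst h; simp

-- ===== VERDICT (by name: the statement is the Claim_ definition above) =====
theorem boundJoin_spec : Claim_equal_boundJoin := by
  intro l _ hpre
  unfold Spec_boundJoin boundJoin boundJoin_alt
  obtain ⟨hne, hnd⟩ := hpre
  cases hl : l.reverse with
  | nil => exact absurd (by simpa using congrArg List.reverse hl) hne
  | cons q rest =>
    simp only [List.foldl_cons]
    have hq : q ∈ l := by
      have : q ∈ l.reverse := hl ▸ List.mem_cons_self
      simpa using this
    have hseed : q.foldl groupAdd PySem.Dict.empty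
        = PySem.Dict.mk (q.map (fun kv => (kv.1, [kv.2]))) := by
      rw [groupAdd_fresh q PySem.Dict.empty (hnd q hq) (fun kv _ => rfl)]
      rfl
    have := collapse_foldl_dicts rest _ (hseed ▸ invNE_singletons q)
    rw [hseed, collapse_singletons] at this
    calc (rest.foldl (fun d q => q.foldl mergeItem d) (PySem.Dict.mk q)).items
        = (collapse (rest.foldl (fun g q => q.foldl groupAdd g)
            (q.foldl groupAdd PySem.Dict.empty))).items := by rw [hseed, this]
      _ = _ := by simp [collapse]
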